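-- pv_equiv track=rewrite | github.com/yoonwooseong/AlgorithmBox | 알고리즘/최단거리연습.py | calc_table
-- ===== SOURCE A (Python) =====
-- def calc_table(short):
--     for n in range(2, len(short)):
--         for i in range(len(short)-n):
--             temp = []
--             for j in range(n):
--                 if j == (n-1):
--                     temp.append(short[i+j+1][i])
--                 else:
--                     temp.append(short[i+j+1][i]+short[i+n][i+j+1])
--             short[i+n][i] = min(temp)
--             del temp
--     return short
-- ===== SOURCE B (Python) =====
-- def calc_table(short):
--     # Top-down memoized recursion over intervals; builds a new table
--     # (return value equals A's; does not mutate the argument).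
--     memo = {}
--
--     def solve(c, r):
--         if r - c < 2:
--             return short[r][c]
--         if (c, r) not in memo:
--             best = short[r][c]
--             for k in range(c + 1, r):
--                 v = solve(c, k) + solve(k, r)
--                 if v < best:
--                     best = v
--             memo[(c, r)] = best
--         return memo[(c, r)]
--
--     return [[solve(c, r) if 2 <= r - c else x for c, x in enumerate(row)]
--             for r, row in enumerate(short)]
-- ===== Notes on version B (the rewrite author's own statement) =====
-- stated objective: alternative
-- what changed: Replaces the in-place bottom-up triple loop over interval lengths with a top-down memoized recursion solve(c,r) = min(original[r][c], min over splits of solve(c,k)+solve(k,r)), rebuilding the table as a new list instead of mutating the argument.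
import Mathlib
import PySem

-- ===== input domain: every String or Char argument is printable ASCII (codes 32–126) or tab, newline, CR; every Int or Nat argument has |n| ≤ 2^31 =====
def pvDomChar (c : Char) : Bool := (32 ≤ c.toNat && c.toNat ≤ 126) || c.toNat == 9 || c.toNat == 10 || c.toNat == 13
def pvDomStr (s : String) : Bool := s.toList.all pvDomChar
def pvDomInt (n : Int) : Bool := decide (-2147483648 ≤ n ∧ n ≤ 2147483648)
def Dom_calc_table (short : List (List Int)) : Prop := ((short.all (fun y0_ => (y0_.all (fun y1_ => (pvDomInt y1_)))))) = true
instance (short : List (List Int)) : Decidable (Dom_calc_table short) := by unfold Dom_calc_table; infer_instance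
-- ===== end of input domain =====

-- B replaces A's in-place bottom-up interval DP by a top-down memoized recursion that
-- rebuilds the table as a new list; equivalence is about the RETURN value only
-- (A mutates its argument in place, B does not).


-- ===== PORT A =====
def calc_table (short : List (List Int)) : List (List Int) :=
  (PySem.List.pyRange 2 (PySem.List.len short) 1).foldl (fun t n =>
    (PySem.List.pyRange 0 (PySem.List.len short - n) 1).foldl (fun t i =>
      let temp := (PySem.List.pyRange 0 n 1).foldl (fun temp j =>
        if j = n - 1 then
          temp ++ [PySem.List.pyGetD (PySem.List.pyGetD t (i+j+1) []) i 0]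
        else
          temp ++ [PySem.List.pyGetD (PySem.List.pyGetD t (i+j+1) []) i 0
                   + PySem.List.pyGetD (PySem.List.pyGetD t (i+n) []) (i+j+1) 0]) []
      PySem.List.pySetD t (i+n)
        (PySem.List.pySetD (PySem.List.pyGetD t (i+n) []) i
          ((PySem.List.min? temp (fun y => y)).getD 0))) t) short

-- ===== PORT B =====
-- helper of B: the memoized recursion 'solve' (memo threaded explicitly)
def solveB (t : List (List Int)) (c r : Int) (memo : PySem.Dict (Int × Int) Int) :
    Int × PySem.Dict (Int × Int) Int :=
  if r - c < 2 then (PySem.List.pyGetD (PySem.List.pyGetD t r []) c 0, memo)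
  else
    match memo.get? (c, r) with
    | some v => (v, memo)
    | none =>
      let s := (PySem.List.pyRange (c+1) r 1).attach.foldl
        (fun (s : Int × PySem.Dict (Int × Int) Int) k =>
          let p1 := solveB t c k.1 s.2
          let p2 := solveB t k.1 r p1.2
          let v := p1.1 + p2.1
          (if v < s.1 then v else s.1, p2.2))
        (PySem.List.pyGetD (PySem.List.pyGetD t r []) c 0, memo)
      (s.1, s.2.insert (c, r) s.1)
termination_by (r - c).toNat
decreasing_by
  all_goals
    have hk := (PySem.List.mem_pyRange_one).1 k.2
    omega

def calc_table_alt (short : List (List Int)) : List (List Int) :=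
  ((PySem.List.enumerate short).foldl
    (fun (acc : List (List Int) × PySem.Dict (Int × Int) Int) p =>
      let rowRes := (PySem.List.enumerate p.2).foldl
        (fun (a : List Int × PySem.Dict (Int × Int) Int) q =>
          if 2 ≤ p.1 - q.1 then
            let pr := solveB short q.1 p.1 a.2
            (a.1 ++ [pr.1], pr.2)
          else (a.1 ++ [q.2], a.2)) ([], acc.2)
      (acc.1 ++ [rowRes.1], rowRes.2)) ([], PySem.Dict.empty)).1

-- ===== PRECONDITION & SPEC =====
-- Pre_ excludes exactly the inputs where A raises IndexError: tables of length ≥ 3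
-- in which some row r is shorter than r entries (A reads short[r][c] for every c < r).
def Pre_calc_table (short : List (List Int)) : Prop :=
  short.length < 3 ∨ ∀ r, r < short.length → r ≤ (short.getD r []).length
instance (short : List (List Int)) : Decidable (Pre_calc_table short) := by
  unfold Pre_calc_table; infer_instance

def pvWitness_calc_table : List (List Int) := [[0], [4, 0], [7, 2, 0], [9, 6, 3, 0]]

def Spec_calc_table (short : List (List Int)) (out : List (List Int)) : Prop := out = calc_table_alt short
instance (short : List (List Int)) (out : List (List Int)) : Decidable (Spec_calc_table short out) := by unfold Spec_calc_table; infer_instance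

-- ===== CLAIM (what is proved, stated in full; the proofs are below) =====
def Claim_equal_calc_table : Prop := ∀ (short : List (List Int)), Dom_calc_table short → Pre_calc_table short → Spec_calc_table short (calc_table short)

-- ===== LEMMAS AND PROOFS =====

def Etbl (t : List (List Int)) (r c : Int) : Int :=
  PySem.List.pyGetD (PySem.List.pyGetD t r []) c 0

def cellF (t : List (List Int)) (c r : Int) : Int :=
  if r - c < 2 then Etbl t r c
  else (PySem.List.pyRange (c+1) r 1).attach.foldl
        (fun best k => min best (cellF t c k.1 + cellF t k.1 r))
        (Etbl t r c)
termination_by (r - c).toNat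
decreasing_by
  all_goals
    have hk := (PySem.List.mem_pyRange_one).1 k.2
    omega

def MemoInv (t : List (List Int)) (m : PySem.Dict (Int × Int) Int) : Prop :=
  ∀ p v, m.get? p = some v → v = cellF t p.1 p.2

lemma cellF_base (t : List (List Int)) {c r : Int} (h : r - c < 2) : cellF t c r = Etbl t r c := by
  rw [cellF]; simp [h]

lemma memoInv_insert {t : List (List Int)} {m : PySem.Dict (Int × Int) Int}
    (hm : MemoInv t m) (c r : Int) (hv : v = cellF t c r) :
    MemoInv t (m.insert (c, r) v) := by
  intro p w hw
  rw [PySem.Dict.get?_insert] at hw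
  split at hw
  · next hp => cases hw; subst hp; simpa using hv
  · exact hm p w hw

lemma foldl_solveB (t : List (List Int)) (c r : Int)
    (H : ∀ c' r' m, (r' - c').toNat < (r - c).toNat → MemoInv t m →
         (solveB t c' r' m).1 = cellF t c' r' ∧ MemoInv t (solveB t c' r' m).2) :
    ∀ (l : List {x // x ∈ PySem.List.pyRange (c+1) r 1}) (b : Int)
      (m : PySem.Dict (Int × Int) Int), MemoInv t m →
      (l.foldl (fun (s : Int × PySem.Dict (Int × Int) Int) k =>
          let p1 := solveB t c k.1 s.2
          let p2 := solveB t k.1 r p1.2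
          let v := p1.1 + p2.1
          (if v < s.1 then v else s.1, p2.2)) (b, m)).1
        = l.foldl (fun best k => min best (cellF t c k.1 + cellF t k.1 r)) b
      ∧ MemoInv t ((l.foldl (fun (s : Int × PySem.Dict (Int × Int) Int) k =>
          let p1 := solveB t c k.1 s.2
          let p2 := solveB t k.1 r p1.2
          let v := p1.1 + p2.1
          (if v < s.1 then v else s.1, p2.2)) (b, m)).2) := by
  intro l
  induction l with
  | nil => intro b m hm; exact ⟨rfl, hm⟩
  | cons k tl ih =>
    intro b m hm
    have hk := (PySem.List.mem_pyRange_one).1 k.2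
    have h1 := H c k.1 m (by omega) hm
    have h2 := H k.1 r _ (by omega) h1.2
    simp only [List.foldl_cons]
    rw [h1.1, h2.1] at *
    have hmin : (if cellF t c k.1 + cellF t k.1 r < b then cellF t c k.1 + cellF t k.1 r else b)
        = min b (cellF t c k.1 + cellF t k.1 r) := by omega
    simpa [h1.1, h2.1, hmin] using ih _ _ h2.2
lemma solveB_correct (t : List (List Int)) :
    ∀ (sz : Nat) (c r : Int) (m : PySem.Dict (Int × Int) Int), (r - c).toNat ≤ sz → MemoInv t m →
      (solveB t c r m).1 = cellF t c r ∧ MemoInv t (solveB t c r m).2 := by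
  intro sz
  induction sz with
  | zero =>
    intro c r m hsz hm
    have hb : r - c < 2 := by omega
    rw [solveB, cellF]
    refine ⟨by simp [hb, Etbl], ?_⟩
    simpa [hb] using hm
  | succ n ih =>
    intro c r m hsz hm
    by_cases hb : r - c < 2
    · rw [solveB, cellF]
      refine ⟨by simp [hb, Etbl], ?_⟩
      simpa [hb] using hm
    · rw [solveB]
      simp only [if_neg hb]
      cases hg : m.get? (c, r) with
      | some v => exact ⟨hm _ _ hg, hm⟩
      | none =>
        have H : ∀ c' r' m', (r' - c').toNat < (r - c).toNat → MemoInv t m' →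
            (solveB t c' r' m').1 = cellF t c' r' ∧ MemoInv t (solveB t c' r' m').2 := by
          intro c' r' m' hlt hm'
          exact ih c' r' m' (by omega) hm'
        have hf := foldl_solveB t c r H (PySem.List.pyRange (c+1) r 1).attach
          (Etbl t r c) m hm
        have hv : (List.foldl
            (fun (s : Int × PySem.Dict (Int × Int) Int) k =>
              (if (solveB t c (k.1) s.2).1 + (solveB t (k.1) r (solveB t c (k.1) s.2).2).1 < s.1 then
                  (solveB t c (k.1) s.2).1 + (solveB t (k.1) r (solveB t c (k.1) s.2).2).1
                else s.1,
                (solveB t (k.1) r (solveB t c (k.1) s.2).2).2))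
            (PySem.List.pyGetD (PySem.List.pyGetD t r []) c 0, m)
            (PySem.List.pyRange (c + 1) r).attach).1 = cellF t c r := by
          rw [cellF, if_neg hb]
          simpa [Etbl] using hf.1
        exact ⟨hv, memoInv_insert hf.2 c r hv⟩
lemma solveB_ok (t : List (List Int)) (c r : Int) (m : PySem.Dict (Int × Int) Int)
    (hm : MemoInv t m) :
    (solveB t c r m).1 = cellF t c r ∧ MemoInv t (solveB t c r m).2 :=
  solveB_correct t (r - c).toNat c r m le_rfl hm

-- common normal form of both programs
def buildT (short : List (List Int)) : List (List Int) :=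
  (PySem.List.enumerate short).map (fun p =>
    (PySem.List.enumerate p.2).map (fun q =>
      if 2 ≤ p.1 - q.1 then cellF short q.1 p.1 else q.2))

lemma rowFoldB (short : List (List Int)) (r : Int) :
    ∀ (row : List Int) (s : Int) (acc : List Int) (m : PySem.Dict (Int × Int) Int),
      MemoInv short m →
      ((PySem.List.enumerate row s).foldl
        (fun (a : List Int × PySem.Dict (Int × Int) Int) q =>
          if 2 ≤ r - q.1 then
            let pr := solveB short q.1 r a.2
            (a.1 ++ [pr.1], pr.2)
          else (a.1 ++ [q.2], a.2)) (acc, m)).1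
        = acc ++ (PySem.List.enumerate row s).map
            (fun q => if 2 ≤ r - q.1 then cellF short q.1 r else q.2)
      ∧ MemoInv short (((PySem.List.enumerate row s).foldl
        (fun (a : List Int × PySem.Dict (Int × Int) Int) q =>
          if 2 ≤ r - q.1 then
            let pr := solveB short q.1 r a.2
            (a.1 ++ [pr.1], pr.2)
          else (a.1 ++ [q.2], a.2)) (acc, m)).2) := by
  intro row
  induction row with
  | nil => intro s acc m hm; simp [PySem.List.enumerate_nil]; exact hm
  | cons x xs ih =>
    intro s acc m hm
    rw [PySem.List.enumerate_cons]
    simp only [List.foldl_cons, List.map_cons]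
    by_cases hc : 2 ≤ r - s
    · have hs := solveB_ok short s r m hm
      simp only [if_pos hc]
      have := ih (s+1) (acc ++ [(solveB short s r m).1]) (solveB short s r m).2 hs.2
      simpa [hs.1] using this
    · simp only [if_neg hc]
      simpa using ih (s+1) (acc ++ [x]) m hm
lemma tableFoldB (short : List (List Int)) :
    ∀ (xs : List (List Int)) (s : Int) (acc : List (List Int))
      (m : PySem.Dict (Int × Int) Int), MemoInv short m →
      (((PySem.List.enumerate xs s).foldl
        (fun (acc : List (List Int) × PySem.Dict (Int × Int) Int) p =>
          let rowRes := (PySem.List.enumerate p.2).foldl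
            (fun (a : List Int × PySem.Dict (Int × Int) Int) q =>
              if 2 ≤ p.1 - q.1 then
                let pr := solveB short q.1 p.1 a.2
                (a.1 ++ [pr.1], pr.2)
              else (a.1 ++ [q.2], a.2)) ([], acc.2)
          (acc.1 ++ [rowRes.1], rowRes.2)) (acc, m)).1)
        = acc ++ (PySem.List.enumerate xs s).map (fun p =>
            (PySem.List.enumerate p.2).map (fun q =>
              if 2 ≤ p.1 - q.1 then cellF short q.1 p.1 else q.2)) := by
  intro xs
  induction xs with
  | nil => intro s acc m hm; simp [PySem.List.enumerate_nil]
  | cons row rest ih =>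
    intro s acc m hm
    rw [PySem.List.enumerate_cons]
    simp only [List.foldl_cons, List.map_cons]
    have hr := rowFoldB short s row 0 [] m hm
    rw [hr.1]
    simpa using ih (s+1) (acc ++ [List.map
      (fun q => if 2 ≤ s - q.1 then cellF short q.1 s else q.2)
      (PySem.List.enumerate row 0)]) _ hr.2

lemma memoInv_empty (short : List (List Int)) : MemoInv short PySem.Dict.empty := by
  intro p v hv
  simp [PySem.Dict.get?_empty] at hv

lemma alt_eq_buildT (short : List (List Int)) : calc_table_alt short = buildT short := by
  unfold calc_table_alt buildT
  have := tableFoldB short short 0 [] PySem.Dict.empty (memoInv_empty short)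
  simpa using this
lemma foldl_min_swap (l : List Int) : ∀ (a b : Int), l.foldl min (min a b) = min b (l.foldl min a) := by
  induction l with
  | nil => intro a b; simp [min_comm]
  | cons x t ih =>
    intro a b
    simp only [List.foldl_cons]
    rw [show min (min a b) x = min (min a x) b by omega, ih]

lemma pymin_append_last (ms : List Int) (o : Int) (h : ms ≠ []) :
    (PySem.List.min? (ms ++ [o]) (fun y => y)).getD 0 = ms.foldl min o := by
  obtain ⟨x, t, rfl⟩ := List.exists_cons_of_ne_nil h
  rw [List.cons_append, PySem.List.min?_id_cons]
  simp only [Option.getD_some, List.foldl_append, List.foldl_cons, List.foldl_nil]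
  rw [show (min o x) = min x o from min_comm o x, foldl_min_swap]
  omega

lemma foldl_inv {α : Type} (P : Int → α → Prop) (f : α → Int → α) :
    ∀ (d : Nat) (a b : Int), (b - a).toNat = d → a ≤ b →
    (∀ i t, a ≤ i → i < b → P i t → P (i+1) (f t i)) →
    ∀ t, P a t → P b ((PySem.List.pyRange a b 1).foldl f t) := by
  intro d
  induction d with
  | zero =>
    intro a b hd hab _ t ht
    have hba : b = a := by omega
    subst hba
    rw [PySem.List.pyRange_one_eq_nil le_rfl]
    exact ht
  | succ n ih =>
    intro a b hd hab hstep t ht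
    rw [PySem.List.pyRange_one_cons (by omega)]
    simp only [List.foldl_cons]
    exact ih (a+1) b (by omega) (by omega)
      (fun i t hi hib => hstep i t (by omega) hib)
      (f t a) (hstep a t le_rfl (by omega) ht)

lemma Etbl_nonneg_eq (t : List (List Int)) (r c : Int) (hr : 0 ≤ r) (hc : 0 ≤ c) :
    Etbl t r c = (t.getD r.toNat []).getD c.toNat 0 := by
  unfold Etbl
  rw [PySem.List.pyGetD_of_nonneg _ _ hr, PySem.List.pyGetD_of_nonneg _ _ hc]

lemma Etbl_update (t : List (List Int)) (R C v : Int) (h0R : 0 ≤ R) (h0C : 0 ≤ C)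
    (hR : R.toNat < t.length) (hC : C.toNat < (t.getD R.toNat []).length)
    (r c : Int) (h0r : 0 ≤ r) (h0c : 0 ≤ c) :
    Etbl (PySem.List.pySetD t R (PySem.List.pySetD (PySem.List.pyGetD t R []) C v)) r c
      = if r = R ∧ c = C then v else Etbl t r c := by
  rw [PySem.List.pyGetD_of_nonneg _ _ h0R, PySem.List.pySetD_of_nonneg _ _ h0R,
      PySem.List.pySetD_of_nonneg _ _ h0C, Etbl_nonneg_eq _ _ _ h0r h0c,
      Etbl_nonneg_eq _ _ _ h0r h0c]
  simp only [List.getD_eq_getElem?_getD, List.getElem?_set]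
  by_cases hrR : r = R
  · have heq : R.toNat = r.toNat := by omega
    simp only [heq, heq ▸ hR]
    by_cases hcC : c = C
    · have hceq : C.toNat = c.toNat := by omega
      have hC' : c.toNat < (t.getD r.toNat []).length := by
        rw [← heq, ← hceq]; exact hC
      have hb : C.toNat < (t[R.toNat]?.getD []).length := by
        rw [← List.getD_eq_getElem?_getD]; omega
      simp [hrR, hcC, hb]
    · have hcne : C.toNat ≠ c.toNat := by omega
      simp [hrR, hcC, hcne, heq]
  · have hne : R.toNat ≠ r.toNat := by omega
    simp [hrR, hne]
lemma cellF_rec (t : List (List Int)) {c r : Int} (h : ¬ r - c < 2) :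
    cellF t c r = (PySem.List.pyRange (c+1) r 1).foldl
      (fun b k => min b (cellF t c k + cellF t k r)) (Etbl t r c) := by
  rw [cellF, if_neg h]
  exact List.foldl_attach
    (l := PySem.List.pyRange (c+1) r 1)
    (f := fun b k => min b (cellF t c k + cellF t k r)) (b := Etbl t r c)

def Shape (short t : List (List Int)) : Prop :=
  t.length = short.length ∧
  ∀ r : Nat, r < short.length → (t.getD r []).length = (short.getD r []).length

def PassInv (short : List (List Int)) (n I : Int) (t : List (List Int)) : Prop :=
  Shape short t ∧
  ∀ r c : Int, 0 ≤ r → 0 ≤ c →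
    Etbl t r c =
      if (2 ≤ r - c ∧ r - c < n ∧ r < (short.length : Int))
         ∨ (r - c = n ∧ c < I ∧ r < (short.length : Int))
      then cellF short c r else Etbl short r c

lemma stepA (short : List (List Int))
    (hPre : ∀ r : Nat, r < short.length → r ≤ (short.getD r []).length)
    (n i : Int) (hn2 : 2 ≤ n) (hnL : n < (short.length : Int))
    (h0i : 0 ≤ i) (hiL : i < (short.length : Int) - n)
    (t : List (List Int)) (ht : PassInv short n i t) :
    PassInv short n (i+1)
      (PySem.List.pySetD t (i+n)
        (PySem.List.pySetD (PySem.List.pyGetD t (i+n) []) i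
          ((PySem.List.min?
            ((PySem.List.pyRange 0 n 1).foldl (fun temp j =>
              if j = n - 1 then
                temp ++ [PySem.List.pyGetD (PySem.List.pyGetD t (i+j+1) []) i 0]
              else
                temp ++ [PySem.List.pyGetD (PySem.List.pyGetD t (i+j+1) []) i 0
                         + PySem.List.pyGetD (PySem.List.pyGetD t (i+n) []) (i+j+1) 0]) [])
            (fun y => y)).getD 0))) := by
  obtain ⟨⟨hlen, hrows⟩, hE⟩ := ht
  set L : Int := (short.length : Int) with hL
  -- 1. the temp list as a map
  have hfun : (fun (temp : List Int) j =>
      if j = n - 1 then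
        temp ++ [PySem.List.pyGetD (PySem.List.pyGetD t (i+j+1) []) i 0]
      else
        temp ++ [PySem.List.pyGetD (PySem.List.pyGetD t (i+j+1) []) i 0
                 + PySem.List.pyGetD (PySem.List.pyGetD t (i+n) []) (i+j+1) 0])
      = fun (temp : List Int) j => temp ++ [if j = n - 1 then Etbl t (i+j+1) i
          else Etbl t (i+j+1) i + Etbl t (i+n) (i+j+1)] := by
    funext temp j; by_cases h : j = n - 1 <;> simp [h, Etbl]
  rw [hfun, PySem.List.foldl_append_singleton_eq_map, List.nil_append]
  -- 2. evaluate entries through the invariant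
  have hmap : (PySem.List.pyRange 0 n 1).map (fun j => if j = n - 1 then Etbl t (i+j+1) i
          else Etbl t (i+j+1) i + Etbl t (i+n) (i+j+1))
      = (PySem.List.pyRange 0 n 1).map (fun j => if j = n - 1 then Etbl short (i+n) i
          else cellF short i (i+j+1) + cellF short (i+j+1) (i+n)) := by
    apply List.map_congr_left
    intro j hj
    have hj' := (PySem.List.mem_pyRange_one).1 hj
    by_cases h : j = n - 1
    · rw [if_pos h, if_pos h, h]
      rw [show i + (n-1) + 1 = i + n by ring]
      rw [hE (i+n) i (by omega) (by omega), if_neg (by omega)]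
    · rw [if_neg h, if_neg h]
      have h1 : Etbl t (i+j+1) i = cellF short i (i+j+1) := by
        by_cases h2 : 2 ≤ j + 1
        · rw [hE (i+j+1) i (by omega) (by omega), if_pos (by omega)]
        · rw [hE (i+j+1) i (by omega) (by omega), if_neg (by omega),
              cellF_base short (by omega)]
      have h2 : Etbl t (i+n) (i+j+1) = cellF short (i+j+1) (i+n) := by
        by_cases h3 : 2 ≤ n - j - 1
        · rw [hE (i+n) (i+j+1) (by omega) (by omega), if_pos (by omega)]
        · rw [hE (i+n) (i+j+1) (by omega) (by omega), if_neg (by omega),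
              cellF_base short (by omega)]
      rw [h1, h2]
  rw [hmap]
  -- 3. split off the last index n-1
  have hsplit : PySem.List.pyRange 0 n 1 = PySem.List.pyRange 0 (n-1) 1 ++ [n-1] := by
    have := PySem.List.pyRange_one_succ_right (a := 0) (b := n-1) (by omega)
    rw [show n - 1 + 1 = n by ring] at this
    exact this
  rw [hsplit, List.map_append, List.map_singleton, if_pos rfl]
  have hms : (PySem.List.pyRange 0 (n-1) 1).map (fun j => if j = n - 1 then Etbl short (i+n) i
          else cellF short i (i+j+1) + cellF short (i+j+1) (i+n))
      = (PySem.List.pyRange 0 (n-1) 1).map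
          (fun j => cellF short i (i+j+1) + cellF short (i+j+1) (i+n)) := by
    apply List.map_congr_left
    intro j hj
    have hj' := (PySem.List.mem_pyRange_one).1 hj
    rw [if_neg (by omega)]
  rw [hms]
  -- 4. the min over temp is cellF short i (i+n)
  have hne : (PySem.List.pyRange 0 (n-1) 1).map
      (fun j => cellF short i (i+j+1) + cellF short (i+j+1) (i+n)) ≠ [] := by
    apply List.ne_nil_of_length_pos
    rw [List.length_map, PySem.List.length_pyRange_one]
    omega
  rw [pymin_append_last _ _ hne]
  have hmin : ((PySem.List.pyRange 0 (n-1) 1).map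
        (fun j => cellF short i (i+j+1) + cellF short (i+j+1) (i+n))).foldl min
        (Etbl short (i+n) i)
      = cellF short i (i+n) := by
    rw [cellF_rec short (by omega), List.foldl_map]
    rw [PySem.List.pyRange_one (i+1) (i+n), PySem.List.pyRange_one 0 (n-1),
        List.foldl_map, List.foldl_map]
    rw [show i + n - (i+1) = n - 1 by ring, show n - 1 - 0 = n - 1 by ring]
    apply PySem.List.foldl_congr_mem
    intro b k hk
    rw [show i + (0 + (k:Int)) + 1 = i + 1 + k by ring]
  rw [hmin]
  have hRn : (i+n).toNat < t.length := by rw [hlen]; omega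
  have hCb : i.toNat < (t.getD (i+n).toNat []).length := by
    have h1 := hrows (i+n).toNat (by omega)
    have h2 := hPre (i+n).toNat (by omega)
    omega
  refine ⟨⟨?_, ?_⟩, ?_⟩
  · rw [PySem.List.pySetD_of_nonneg _ _ (by omega : (0:Int) ≤ i+n), List.length_set]
    exact hlen
  · intro r hr
    rw [PySem.List.pySetD_of_nonneg _ _ (by omega : (0:Int) ≤ i+n)]
    by_cases hrR : (i+n).toNat = r
    · subst hrR
      rw [List.getD_eq_getElem?_getD, List.getElem?_set, if_pos rfl, if_pos hRn]
      simp only [Option.getD_some]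
      rw [PySem.List.pySetD_of_nonneg _ _ h0i, List.length_set,
          PySem.List.pyGetD_of_nonneg _ _ (by omega : (0:Int) ≤ i+n)]
      exact hrows _ hr
    · rw [List.getD_eq_getElem?_getD, List.getElem?_set, if_neg hrR,
          ← List.getD_eq_getElem?_getD]
      exact hrows r hr
  · intro r c h0r h0c
    rw [Etbl_update t (i+n) i (cellF short i (i+n)) (by omega) (by omega) hRn hCb r c h0r h0c]
    by_cases hkey : r = i+n ∧ c = i
    · rw [if_pos hkey, if_pos (by omega), hkey.1, hkey.2]
    · rw [if_neg hkey, hE r c h0r h0c,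
          if_congr (by omega : (2 ≤ r - c ∧ r - c < n ∧ r < L ∨ r - c = n ∧ c < i ∧ r < L) ↔
            (2 ≤ r - c ∧ r - c < n ∧ r < L ∨ r - c = n ∧ c < i + 1 ∧ r < L)) rfl rfl]
lemma passInv_init (short : List (List Int)) : PassInv short 2 0 short := by
  refine ⟨⟨rfl, fun _ _ => rfl⟩, ?_⟩
  intro r c h0r h0c
  rw [if_neg (by omega)]

lemma passInv_shift (short : List (List Int)) (n : Int) (hn : 2 ≤ n) (t : List (List Int))
    (h : PassInv short n ((short.length : Int) - n) t) : PassInv short (n+1) 0 t := by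
  refine ⟨h.1, ?_⟩
  intro r c h0r h0c
  rw [h.2 r c h0r h0c,
      if_congr (by omega : (2 ≤ r - c ∧ r - c < n ∧ r < (short.length:Int)
          ∨ r - c = n ∧ c < (short.length:Int) - n ∧ r < (short.length:Int)) ↔
        (2 ≤ r - c ∧ r - c < n + 1 ∧ r < (short.length:Int)
          ∨ r - c = n + 1 ∧ c < 0 ∧ r < (short.length:Int))) rfl rfl]

lemma calc_table_degenerate (short : List (List Int)) (h : short.length < 3) :
    calc_table short = short := by
  unfold calc_table
  simp only [PySem.List.len_eq]
  rw [PySem.List.pyRange_one_eq_nil (by exact_mod_cast by omega : (short.length : Int) ≤ 2)]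
  rfl

lemma buildT_degenerate (short : List (List Int)) (h : short.length < 3) :
    buildT short = short := by
  unfold buildT
  conv_rhs => rw [← PySem.List.map_snd_enumerate short 0]
  apply List.map_congr_left
  intro p hp
  obtain ⟨k, hk, rfl⟩ := (PySem.List.mem_enumerate_iff _ _ _).1 hp
  have hinner : (PySem.List.enumerate short[k] 0).map
      (fun q => if 2 ≤ (0 + (k:Int)) - q.1 then cellF short q.1 (0 + k) else q.2)
      = (PySem.List.enumerate short[k] 0).map (fun q => q.2) := by
    apply List.map_congr_left
    intro q hq
    obtain ⟨k', hk', rfl⟩ := (PySem.List.mem_enumerate_iff _ _ _).1 hq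
    rw [if_neg (by omega)]
  show (PySem.List.enumerate short[k] 0).map
      (fun q => if 2 ≤ (0 + (k:Int)) - q.1 then cellF short q.1 (0 + k) else q.2) = short[k]
  rw [hinner, PySem.List.map_snd_enumerate]
lemma final_eq (short : List (List Int)) (T : List (List Int))
    (hT : PassInv short (short.length : Int) 0 T) : T = buildT short := by
  obtain ⟨⟨hlen, hrows⟩, hE⟩ := hT
  have hblen : (buildT short).length = short.length := by
    unfold buildT
    rw [List.length_map, PySem.List.length_enumerate]
  apply List.ext_getElem (by omega)
  intro r h1 h2
  have hrS : r < short.length := by omega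
  have hrowlen : T[r].length = short[r].length := by
    have := hrows r hrS
    rwa [List.getD_eq_getElem (hn := by omega), List.getD_eq_getElem (hn := hrS)] at this
  unfold buildT
  rw [List.getElem_map, PySem.List.getElem_enumerate]
  apply List.ext_getElem
  · rw [List.length_map, PySem.List.length_enumerate, hrowlen]
  · intro c hc1 hc2
    rw [List.getElem_map, PySem.List.getElem_enumerate]
    have hcS : c < short[r].length := by
      rw [List.length_map, PySem.List.length_enumerate] at hc2
      exact hc2
    have hcT : c < T[r].length := by omega
    show T[r][c] = if 2 ≤ (0 + (r:Int)) - (0 + (c:Int))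
      then cellF short (0 + (c:Int)) (0 + (r:Int)) else short[r][c]
    have hEn := hE (r : Int) (c : Int) (by positivity) (by positivity)
    rw [Etbl_nonneg_eq _ _ _ (by positivity) (by positivity),
        Etbl_nonneg_eq _ _ _ (by positivity) (by positivity)] at hEn
    simp only [Int.toNat_natCast] at hEn
    rw [List.getD_eq_getElem T [] (by omega), List.getD_eq_getElem T[r] 0 (by omega),
        List.getD_eq_getElem short [] hrS, List.getD_eq_getElem short[r] 0 hcS] at hEn
    rw [hEn, if_congr (by omega : (2 ≤ (r:Int) - (c:Int) ∧ (r:Int) - c < (short.length:Int)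
          ∧ (r:Int) < (short.length:Int) ∨ (r:Int) - (c:Int) = (short.length:Int)
          ∧ (c:Int) < 0 ∧ (r:Int) < (short.length:Int))
        ↔ 2 ≤ (0 + (r:Int)) - (0 + (c:Int)))
        (show cellF short (c:Int) (r:Int) = cellF short (0 + (c:Int)) (0 + (r:Int)) by simp) rfl]
lemma A_main (short : List (List Int))
    (hPre : ∀ r : Nat, r < short.length → r ≤ (short.getD r []).length)
    (h3 : ¬ short.length < 3) : calc_table short = buildT short := by
  apply final_eq
  unfold calc_table
  simp only [PySem.List.len_eq]
  refine foldl_inv (fun N t => PassInv short N 0 t) _ ((short.length:Int) - 2).toNat 2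
    (short.length:Int) rfl (by omega) ?_ short (passInv_init short)
  intro nn t h2 hnL hP
  apply passInv_shift short nn h2
  refine foldl_inv (fun I t' => PassInv short nn I t') _ ((short.length:Int) - nn).toNat 0
    ((short.length:Int) - nn)
    (by omega : ((short.length:Int) - nn - 0).toNat = ((short.length:Int) - nn).toNat)
    (by omega) ?_ t hP
  intro i t' h0i hiL hPi
  exact stepA short hPre nn i h2 hnL h0i hiL t' hPi

theorem calc_table_spec' : ∀ (short : List (List Int)),
    (short.length < 3 ∨ ∀ r, r < short.length → r ≤ (short.getD r []).length) →
    calc_table short = calc_table_alt short := by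
  intro short hP
  rw [alt_eq_buildT]
  by_cases h3 : short.length < 3
  · rw [calc_table_degenerate short h3, buildT_degenerate short h3]
  · cases hP with
    | inl h => exact absurd h h3
    | inr h => exact A_main short h h3

-- ===== VERDICT (by name: the statement is the Claim_ definition above) =====
theorem calc_table_spec : Claim_equal_calc_table := by
  intro short _hD hP
  unfold Spec_calc_table
  exact calc_table_spec' short hP
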